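-- pv_equiv track=rewrite | github.com/tom-brash/advent-of-code | 2020/day15/15-2.py | list_rindex
-- ===== SOURCE A (Python) =====
-- def list_rindex(recent_li, li, x):
--     for i in reversed(range(len(recent_li))):
--         if recent_li[i] == x:
--             return len(li) + i + 1
--
--     for i in reversed(range(len(li))):
--         if li[i] == x:
--             return i + 1
--     return 0
-- ===== SOURCE B (Python) =====
-- def list_rindex(recent_li, li, x):
--     result = 0
--     for i, v in enumerate(li + recent_li):
--         if v == x:
--             result = i + 1
--     return result
-- ===== Notes on version B (the rewrite author's own statement) =====
-- stated objective: simpler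
-- what changed: Replaces the two reverse scans with early returns by one forward pass over li + recent_li that keeps the last matching position (+1) in an accumulator; the concatenation order makes both offset formulas fall out automatically.
import Mathlib
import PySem

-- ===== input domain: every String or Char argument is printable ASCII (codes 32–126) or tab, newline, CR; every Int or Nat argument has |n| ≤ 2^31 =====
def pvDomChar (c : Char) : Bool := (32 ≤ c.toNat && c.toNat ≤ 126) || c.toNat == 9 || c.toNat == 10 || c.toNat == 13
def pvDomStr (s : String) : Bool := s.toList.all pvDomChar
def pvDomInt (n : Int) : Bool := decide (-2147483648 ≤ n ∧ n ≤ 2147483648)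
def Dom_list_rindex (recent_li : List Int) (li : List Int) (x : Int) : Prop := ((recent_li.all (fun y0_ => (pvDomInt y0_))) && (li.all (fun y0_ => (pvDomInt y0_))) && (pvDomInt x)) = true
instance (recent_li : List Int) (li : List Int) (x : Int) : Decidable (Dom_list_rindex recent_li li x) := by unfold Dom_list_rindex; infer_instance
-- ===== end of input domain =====

-- B replaces A's two reverse scans with early return by a single forward pass over
-- li ++ recent_li maintaining the last matching position in an accumulator (simpler).

-- ===== PORT A =====
-- 'for i in reversed(range(len(l))): if l[i] == x: return <i>': early return becomes the
-- first index of the reversed range list whose element equals x. Indices produced by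
-- range(len(l)) are always in range, so l[i]? = some x is exact for 'l[i] == x'.
-- reversed(range(n)) iterates i = n-1, n-2, …, 0: a countdown recursion on n.
def scanRevA (l : List Int) (x : Int) : Nat → Option Nat
  | 0 => none
  | n + 1 => if l[n]? = some x then some n else scanRevA l x n

def list_rindex (recent_li : List Int) (li : List Int) (x : Int) : Int :=
  match scanRevA recent_li x recent_li.length with
  | some i => (li.length : Int) + (i : Int) + 1
  | none =>
    match scanRevA li x li.length with
    | some i => (i : Int) + 1
    | none => 0

-- ===== PORT B =====
-- 'result = 0; for i, v in enumerate(li + recent_li): if v == x: result = i + 1'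
def fwdB (x : Int) : List Int → Nat → Int → Int
  | [], _, result => result
  | v :: rest, i, result => fwdB x rest (i + 1) (if v = x then (i : Int) + 1 else result)

def list_rindex_alt (recent_li : List Int) (li : List Int) (x : Int) : Int :=
  fwdB x (li ++ recent_li) 0 0

-- ===== PRECONDITION & SPEC =====
def Spec_list_rindex (recent_li : List Int) (li : List Int) (x : Int) (out : Int) : Prop := out = list_rindex_alt recent_li li x
instance (recent_li : List Int) (li : List Int) (x : Int) (out : Int) : Decidable (Spec_list_rindex recent_li li x out) := by unfold Spec_list_rindex; infer_instance

-- ===== CLAIM (what is proved, stated in full; the proofs are below) =====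
def Claim_equal_list_rindex : Prop := ∀ (recent_li : List Int) (li : List Int) (x : Int), Dom_list_rindex recent_li li x → Spec_list_rindex recent_li li x (list_rindex recent_li li x)

-- ===== LEMMAS AND PROOFS =====

-- canonical form: index of the last occurrence of x among the first n elements of l
def topScan (l : List Int) (x : Int) : Nat → Option Nat
  | 0 => none
  | n + 1 => if l[n]? = some x then some n else topScan l x n

theorem scanRevA_eq_topScan (l : List Int) (x : Int) (n : Nat) :
    scanRevA l x n = topScan l x n := by
  induction n with
  | zero => rfl
  | succ n ih => simp [scanRevA, topScan, ih]

theorem topScan_cons (v : Int) (l : List Int) (x : Int) (n : Nat) :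
    topScan (v :: l) x (n + 1) =
      (match topScan l x n with
       | some j => some (j + 1)
       | none => if v = x then some 0 else none) := by
  induction n with
  | zero => simp [topScan]
  | succ n ih =>
    rw [show n + 1 + 1 = (n + 1) + 1 from rfl]
    unfold topScan
    rw [ih]
    rcases h : l[n]? with _ | w
    · simp [h]
    · by_cases hw : w = x <;> simp [h, hw]

theorem fwdB_topScan (x : Int) (l : List Int) (i : Nat) (r : Int) :
    fwdB x l i r =
      (match topScan l x l.length with
       | some j => (i : Int) + (j : Int) + 1
       | none => r) := by
  induction l generalizing i r with
  | nil => rfl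
  | cons v rest ih =>
    show fwdB x rest (i + 1) (if v = x then (i : Int) + 1 else r) = _
    rw [ih, List.length_cons, topScan_cons]
    rcases topScan rest x rest.length with _ | j
    · by_cases hv : v = x <;> simp [hv]
    · simp; ring

theorem fwdB_append (x : Int) (l1 l2 : List Int) (i : Nat) (r : Int) :
    fwdB x (l1 ++ l2) i r = fwdB x l2 (i + l1.length) (fwdB x l1 i r) := by
  induction l1 generalizing i r with
  | nil => simp [fwdB]
  | cons v rest ih =>
    show fwdB x (rest ++ l2) (i + 1) _ = _
    rw [ih]
    simp [fwdB]
    ring_nf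

-- ===== VERDICT (by name: the statement is the Claim_ definition above) =====
theorem list_rindex_spec : Claim_equal_list_rindex := by
  intro recent_li li x _
  unfold Spec_list_rindex list_rindex list_rindex_alt
  rw [fwdB_append, fwdB_topScan (l := recent_li), fwdB_topScan (l := li),
    scanRevA_eq_topScan, scanRevA_eq_topScan]
  rcases topScan recent_li x recent_li.length with _ | j
  · rcases topScan li x li.length with _ | j <;> simp
  · simp
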